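-- pv_equiv track=rewrite | github.com/willschlitzer/adventofcode2024 | day2/day2_p2.py | deleted_item_checker
-- ===== SOURCE A (Python) =====
-- def row_difference_check(row, row_increasing, bad_level_removed=False):
--     if row_increasing:
--         for i in range(len(row) - 1):
--             bigger_value = row[i + 1]
--             smaller_value = row[i]
--             if not difference_checker(
--                 bigger_value=bigger_value, smaller_value=smaller_value
--             ):
--                 if bad_level_removed:
--                     return False
--                 else:
--                     return deleted_item_checker(row=row, row_increasing=row_increasing)
--         return True
--     else:
--         for i in range(len(row) - 1):
--             bigger_value = row[i]
--             smaller_value = row[i + 1]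
--             if not difference_checker(
--                 bigger_value=bigger_value, smaller_value=smaller_value
--             ):
--                 if bad_level_removed:
--                     return False
--                 else:
--                     return deleted_item_checker(row=row, row_increasing=row_increasing)
--         return True
--
-- def difference_checker(bigger_value, smaller_value):
--     upper_diff = 3
--     lower_diff = 1
--     if (bigger_value - smaller_value < 1) or (bigger_value - smaller_value > 3):
--         return False
--     return True
--
-- def deleted_item_checker(row, row_increasing):
--     for i in range(len(row)):
--         temp_row = row.copy()
--         del temp_row[i]
--         if row_difference_check(
--             row=temp_row, row_increasing=row_increasing, bad_level_removed=True
--         ):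
--             return True
--     return False
-- ===== SOURCE B (Python) =====
-- def deleted_item_checker(row, row_increasing):
--     # Single pass: find the first violating adjacent pair (v, v+1); any deletion
--     # other than v or v+1 leaves that pair adjacent, so only those two candidates
--     # need re-checking.
--     def ok(a, b):
--         d = b - a if row_increasing else a - b
--         return 1 <= d <= 3
--
--     def valid(seq):
--         return all(ok(x, y) for x, y in zip(seq, seq[1:]))
--
--     if not row:
--         return False
--     v = next((i for i, (x, y) in enumerate(zip(row, row[1:])) if not ok(x, y)), None)
--     if v is None:
--         return True
--     return valid(row[:v] + row[v + 1:]) or valid(row[:v + 1] + row[v + 2:])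
-- ===== Notes on version B (the rewrite author's own statement) =====
-- stated objective: faster
-- what changed: Instead of trying the deletion of every index and re-scanning the whole row each time, B finds the first violating adjacent pair in one pass and only tests deleting its two endpoints (any other deletion leaves the violating pair adjacent).
import Mathlib
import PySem

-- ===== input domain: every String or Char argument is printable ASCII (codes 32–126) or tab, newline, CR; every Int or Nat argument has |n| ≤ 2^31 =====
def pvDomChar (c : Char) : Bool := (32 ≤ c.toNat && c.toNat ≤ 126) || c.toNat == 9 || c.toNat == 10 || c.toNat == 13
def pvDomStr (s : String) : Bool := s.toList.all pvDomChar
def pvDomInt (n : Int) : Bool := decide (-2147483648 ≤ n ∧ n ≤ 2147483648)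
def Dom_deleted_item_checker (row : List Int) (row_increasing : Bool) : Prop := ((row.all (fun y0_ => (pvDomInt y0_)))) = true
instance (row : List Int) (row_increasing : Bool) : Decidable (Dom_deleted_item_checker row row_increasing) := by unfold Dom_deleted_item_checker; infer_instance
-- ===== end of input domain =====

-- B replaces A's try-every-deletion O(n^2) scan by one pass that locates the first
-- violating adjacent pair and tests only the two deletions that can remove it.


-- ===== PORT A =====
-- difference_checker(bigger_value, smaller_value)
def diffCheckerA (bigger_value smaller_value : Int) : Bool :=
  if (bigger_value - smaller_value < 1) || (bigger_value - smaller_value > 3) then false else true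

-- row_difference_check(row, row_increasing, bad_level_removed=True): the `for i in
-- range(len(row)-1)` loop (the only form deleted_item_checker calls: a violation
-- returns False immediately).  Python's two per-branch loops differ only in which
-- element is `bigger`/`smaller`; the `if row_increasing` selects that here.
def rdcLoopA (row : List Int) (row_increasing : Bool) (i : Nat) : Bool :=
  if h : i + 1 < row.length then
    let bigger_value := if row_increasing then row[i+1] else row[i]
    let smaller_value := if row_increasing then row[i] else row[i+1]
    if diffCheckerA bigger_value smaller_value then rdcLoopA row row_increasing (i+1) else false
  else true
termination_by row.length - i

-- the `for i in range(len(row))` loop of deleted_item_checker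
def delLoopA (row : List Int) (row_increasing : Bool) (i : Nat) : Bool :=
  if i < row.length then
    if rdcLoopA (row.eraseIdx i) row_increasing 0 then true
    else delLoopA row row_increasing (i+1)
  else false
termination_by row.length - i

def deleted_item_checker (row : List Int) (row_increasing : Bool) : Bool :=
  delLoopA row row_increasing 0

-- ===== PORT B =====
def okB (row_increasing : Bool) (a b : Int) : Bool :=
  let d := if row_increasing then b - a else a - b
  decide (1 ≤ d) && decide (d ≤ 3)

-- valid(seq): all adjacent pairs ok (Source B's zip(seq, seq[1:]))
def validB (row_increasing : Bool) : List Int → Bool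
  | a :: b :: rest => okB row_increasing a b && validB row_increasing (b :: rest)
  | _ => true

-- index of the first violating adjacent pair (Source B's next(... enumerate ...))
def firstViolB (row_increasing : Bool) : List Int → Nat → Option Nat
  | a :: b :: rest, i =>
      if okB row_increasing a b then firstViolB row_increasing (b :: rest) (i+1) else some i
  | _, _ => none

def deleted_item_checker_alt (row : List Int) (row_increasing : Bool) : Bool :=
  if row.isEmpty then false
  else
    match firstViolB row_increasing row 0 with
    | none => true
    | some v =>
        validB row_increasing (row.take v ++ row.drop (v+1)) ||
        validB row_increasing (row.take (v+1) ++ row.drop (v+2))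

-- ===== PRECONDITION & SPEC =====
def Spec_deleted_item_checker (row : List Int) (row_increasing : Bool) (out : Bool) : Prop := out = deleted_item_checker_alt row row_increasing
instance (row : List Int) (row_increasing : Bool) (out : Bool) : Decidable (Spec_deleted_item_checker row row_increasing out) := by unfold Spec_deleted_item_checker; infer_instance

-- ===== CLAIM (what is proved, stated in full; the proofs are below) =====
def Claim_equal_deleted_item_checker : Prop := ∀ (row : List Int) (row_increasing : Bool), Dom_deleted_item_checker row row_increasing → Spec_deleted_item_checker row row_increasing (deleted_item_checker row row_increasing)

-- ===== LEMMAS AND PROOFS =====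

-- A's difference_checker, applied as the branches apply it, is B's okB
theorem diffA_eq_okB (inc : Bool) (a b : Int) :
    diffCheckerA (if inc then b else a) (if inc then a else b) = okB inc a b := by
  cases inc <;> simp only [diffCheckerA, okB] <;>
    split_ifs with h <;> simp_all <;> omega

-- validB characterised by indices
theorem validB_iff (inc : Bool) (l : List Int) :
    validB inc l = true ↔ ∀ k (h : k + 1 < l.length), okB inc l[k] l[k+1] = true := by
  induction l with
  | nil => simp [validB]
  | cons a t ih =>
    cases t with
    | nil => simp [validB]
    | cons b rest =>
      simp only [validB, Bool.and_eq_true, ih]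
      constructor
      · rintro ⟨h0, h1⟩ k hk
        cases k with
        | zero => simpa using h0
        | succ k => exact h1 k (by simpa using hk)
      · intro h
        refine ⟨by simpa using h 0 (by simp), fun k hk => ?_⟩
        simpa using h (k+1) (by simpa using hk)

theorem rdcLoopA_iff (inc : Bool) (row : List Int) (i : Nat) :
    rdcLoopA row inc i = true ↔
      ∀ k, i ≤ k → ∀ (h : k + 1 < row.length), okB inc row[k] row[k+1] = true := by
  induction' hn : row.length - i using Nat.strong_induction_on with n IH generalizing i
  rw [rdcLoopA]
  by_cases h : i + 1 < row.length
  · simp only [h, dif_pos]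
    rw [diffA_eq_okB]
    by_cases hok : okB inc row[i] row[i+1] = true
    · simp only [hok, if_true]
      rw [IH (row.length - (i+1)) (by omega) (i+1) rfl]
      constructor
      · intro H k hk hk1
        rcases Nat.eq_or_lt_of_le hk with rfl | hlt
        · exact hok
        · exact H k hlt hk1
      · intro H k hk hk1
        exact H k (by omega) hk1
    · simp only [Bool.not_eq_true] at hok
      simp only [hok, Bool.false_eq_true, if_false]
      constructor
      · intro H; exact absurd H (by simp)
      · intro H
        exact absurd (H i le_rfl h) (by simp [hok])
  · simp only [h, dif_neg, not_false_iff]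
    constructor
    · intro _ k hk hk1; omega
    · intro _; trivial

theorem rdcLoopA_eq_validB (inc : Bool) (row : List Int) :
    rdcLoopA row inc 0 = validB inc row := by
  rw [Bool.eq_iff_iff, rdcLoopA_iff, validB_iff]
  constructor
  · intro H k hk; exact H k (Nat.zero_le _) hk
  · intro H k _ hk; exact H k hk

theorem delLoopA_iff (inc : Bool) (row : List Int) (i : Nat) :
    delLoopA row inc i = true ↔
      ∃ j, i ≤ j ∧ j < row.length ∧ validB inc (row.eraseIdx j) = true := by
  induction' hn : row.length - i using Nat.strong_induction_on with n IH generalizing i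
  rw [delLoopA]
  by_cases h : i < row.length
  · simp only [h, if_true]
    rw [rdcLoopA_eq_validB]
    by_cases hv : validB inc (row.eraseIdx i) = true
    · simp only [hv, if_true]
      constructor
      · intro _; exact ⟨i, le_rfl, h, hv⟩
      · intro _; trivial
    · simp only [Bool.not_eq_true] at hv
      simp only [hv, Bool.false_eq_true, if_false]
      rw [IH (row.length - (i+1)) (by omega) (i+1) rfl]
      constructor
      · rintro ⟨j, hj1, hj2, hj3⟩; exact ⟨j, by omega, hj2, hj3⟩
      · rintro ⟨j, hj1, hj2, hj3⟩
        refine ⟨j, ?_, hj2, hj3⟩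
        rcases Nat.eq_or_lt_of_le hj1 with rfl | hlt
        · rw [hj3] at hv; exact absurd hv (by simp)
        · omega
  · simp only [h, if_false]
    constructor
    · intro hF; exact absurd hF (by simp)
    · rintro ⟨j, hj1, hj2, _⟩; omega

theorem fv_ge (inc : Bool) (l : List Int) (i m : Nat)
    (h : firstViolB inc l i = some m) : i ≤ m := by
  induction l generalizing i with
  | nil => simp [firstViolB] at h
  | cons a t ih =>
    cases t with
    | nil => simp [firstViolB] at h
    | cons b rest =>
      rw [firstViolB] at h
      split_ifs at h with hok
      · have := ih (i := i+1) h; omega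
      · simp at h; omega

theorem fv_none_iff (inc : Bool) (l : List Int) (i : Nat) :
    firstViolB inc l i = none ↔ validB inc l = true := by
  induction l generalizing i with
  | nil => simp [firstViolB, validB]
  | cons a t ih =>
    cases t with
    | nil => simp [firstViolB, validB]
    | cons b rest =>
      rw [firstViolB, validB]
      split_ifs with hok
      · simpa [hok] using ih (i := i+1)
      · simp [hok]

theorem fv_some_spec (inc : Bool) (l : List Int) (i v : Nat)
    (h : firstViolB inc l i = some (i + v)) :
    ∃ hlt : v + 1 < l.length, okB inc (l[v]'(by omega)) (l[v+1]'hlt) = false := by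
  induction l generalizing i v with
  | nil => simp [firstViolB] at h
  | cons a t ih =>
    cases t with
    | nil => simp [firstViolB] at h
    | cons b rest =>
      rw [firstViolB] at h
      split_ifs at h with hok
      · have hge := fv_ge inc _ _ _ h
        have hv1 : 1 ≤ v := by omega
        have h' : firstViolB inc (b :: rest) (i+1) = some ((i+1) + (v-1)) := by
          rw [h]; congr 1; omega
        obtain ⟨hl, hk⟩ := ih _ _ h'
        obtain ⟨w, rfl⟩ : ∃ w, v = w + 1 := ⟨v - 1, by omega⟩
        simp only [Nat.add_sub_cancel] at hl hk
        refine ⟨by simp only [List.length_cons] at hl ⊢; omega, ?_⟩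
        simpa using hk
      · simp only [Option.some.injEq] at h
        have hv0 : v = 0 := by omega
        subst hv0
        refine ⟨by simp only [List.length_cons]; omega, ?_⟩
        simpa using hok

-- any deletion other than the two endpoints of a violating pair stays invalid
theorem other_erase_invalid (inc : Bool) (row : List Int) (v j : Nat)
    (hv : v + 1 < row.length) (hbad : okB inc row[v] row[v+1] = false)
    (hj : j < row.length) (hjv : j ≠ v) (hjv1 : j ≠ v + 1) :
    validB inc (row.eraseIdx j) = false := by
  by_contra hcon
  rw [Bool.not_eq_false, validB_iff] at hcon
  have hlen : (row.eraseIdx j).length = row.length - 1 := by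
    rw [List.length_eraseIdx]; simp [hj]
  rcases Nat.lt_or_ge j v with hlt | hge
  · -- j < v : pair appears at indices v-1, v in the erased list
    have hk : (v - 1) + 1 < (row.eraseIdx j).length := by omega
    have := hcon (v-1) hk
    have e1 : (row.eraseIdx j)[v-1] = row[v] := by
      rw [List.getElem_eraseIdx]
      rw [dif_neg (by omega)]
      congr 1; omega
    have e2 : (row.eraseIdx j)[v-1+1] = row[v+1] := by
      rw [List.getElem_eraseIdx]
      rw [dif_neg (by omega)]
      congr 1; omega
    rw [e1, e2] at this
    rw [this] at hbad; exact absurd hbad (by simp)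
  · -- j > v+1 : pair stays at indices v, v+1
    have hgt : v + 1 < j := by omega
    have hk : v + 1 < (row.eraseIdx j).length := by omega
    have := hcon v hk
    have e1 : (row.eraseIdx j)[v] = row[v] := by
      rw [List.getElem_eraseIdx, dif_pos (by omega)]
    have e2 : (row.eraseIdx j)[v+1] = row[v+1] := by
      rw [List.getElem_eraseIdx, dif_pos (by omega)]
    rw [e1, e2] at this
    rw [this] at hbad; exact absurd hbad (by simp)

theorem validB_tail (inc : Bool) (a : Int) (t : List Int)
    (h : validB inc (a :: t) = true) : validB inc t = true := by
  cases t with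
  | nil => simp [validB]
  | cons b rest => simp only [validB, Bool.and_eq_true] at h; exact h.2

-- ===== VERDICT (by name: the statement is the Claim_ definition above) =====
theorem deleted_item_checker_spec : Claim_equal_deleted_item_checker := by
  intro row inc _dom
  show delLoopA row inc 0 = deleted_item_checker_alt row inc
  unfold deleted_item_checker_alt
  cases row with
  | nil =>
    rw [delLoopA]; simp
  | cons a t =>
    simp only [List.isEmpty_cons, if_false, Bool.false_eq_true]
    cases hfv : firstViolB inc (a :: t) 0 with
    | none =>
      have hvalid : validB inc (a :: t) = true := (fv_none_iff inc _ 0).mp hfv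
      rw [Bool.eq_iff_iff, delLoopA_iff]
      simp only [iff_true]
      exact ⟨0, le_rfl, by simp, by simpa using validB_tail inc a t hvalid⟩
    | some v =>
      obtain ⟨hvlen, hbad⟩ := fv_some_spec inc (a :: t) 0 v (by simpa using hfv)
      have he1 : (a :: t).take v ++ (a :: t).drop (v+1) = (a :: t).eraseIdx v :=
        (List.eraseIdx_eq_take_drop_succ _ _).symm
      have he2 : (a :: t).take (v+1) ++ (a :: t).drop (v+2) = (a :: t).eraseIdx (v+1) :=
        (List.eraseIdx_eq_take_drop_succ _ _).symm
      change delLoopA (a :: t) inc 0 =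
        (validB inc ((a :: t).take v ++ (a :: t).drop (v+1)) ||
         validB inc ((a :: t).take (v+1) ++ (a :: t).drop (v+2)))
      rw [he1, he2, Bool.eq_iff_iff, delLoopA_iff, Bool.or_eq_true]
      constructor
      · rintro ⟨j, _, hj2, hj3⟩
        by_cases h1 : j = v
        · left; rw [← h1]; exact hj3
        by_cases h2 : j = v + 1
        · right; rw [← h2]; exact hj3
        · have := other_erase_invalid inc (a :: t) v j hvlen hbad hj2 h1 h2
          rw [this] at hj3; exact absurd hj3 (by simp)
      · rintro (h | h)
        · exact ⟨v, Nat.zero_le _, by omega, h⟩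
        · exact ⟨v+1, Nat.zero_le _, hvlen, h⟩
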